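-- pv_equiv track=rewrite | github.com/jshelb/bpl-app | api/scheduler.py | calculate_objective
-- ===== SOURCE A (Python) =====
-- import itertools
-- from collections import Counter, defaultdict
--
-- def calculate_objective(schedule) -> int:
--     """
--     Calculate the objective value of the schedule to penalize repeat games
--
--     Args:
--         schedule (list): List representing the schedule.
--
--     Returns:
--         int: Objective value.
--
--     """
--     all_matchups = [matchup for week in schedule for group in week for matchup in itertools.combinations(group, 2)]
--
--     matchup_counts = defaultdict(int)
--     for matchup in all_matchups:
--         sorted_matchup = tuple(sorted(matchup))
--         matchup_counts[sorted_matchup] += 1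
--
--     total_penalty = sum((count - 1) ** 2 for count in matchup_counts.values())
--
--     return total_penalty
-- ===== SOURCE B (Python) =====
-- def calculate_objective(schedule) -> int:
--     """One streaming pass: keep per-pair counts and a running penalty,
--     adding 2*k-1 when a pair already seen k>=1 times recurs (since
--     (k)^2 - (k-1)^2 = 2k-1); no intermediate matchup list, no final sum."""
--     counts = {}
--     penalty = 0
--     for week in schedule:
--         for group in week:
--             rest = list(group)
--             while rest:
--                 a = rest.pop(0)
--                 for b in rest:
--                     key = (a, b) if a <= b else (b, a)
--                     k = counts.get(key, 0)
--                     if k: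
--                         penalty += 2 * k - 1
--                     counts[key] = k + 1
--     return penalty
-- ===== Notes on version B (the rewrite author's own statement) =====
-- stated objective: alternative
-- what changed: Replaces A's three phases (materialize all matchups via itertools.combinations, build a count dict, then sum (count-1)^2 over its values) with one streaming pass that emits pairs by popping the group head and keeps a running penalty, adding 2k-1 when a pair already counted k times recurs ((k)^2-(k-1)^2 = 2k-1), so no intermediate matchup list and no final sum.
import Mathlib
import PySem

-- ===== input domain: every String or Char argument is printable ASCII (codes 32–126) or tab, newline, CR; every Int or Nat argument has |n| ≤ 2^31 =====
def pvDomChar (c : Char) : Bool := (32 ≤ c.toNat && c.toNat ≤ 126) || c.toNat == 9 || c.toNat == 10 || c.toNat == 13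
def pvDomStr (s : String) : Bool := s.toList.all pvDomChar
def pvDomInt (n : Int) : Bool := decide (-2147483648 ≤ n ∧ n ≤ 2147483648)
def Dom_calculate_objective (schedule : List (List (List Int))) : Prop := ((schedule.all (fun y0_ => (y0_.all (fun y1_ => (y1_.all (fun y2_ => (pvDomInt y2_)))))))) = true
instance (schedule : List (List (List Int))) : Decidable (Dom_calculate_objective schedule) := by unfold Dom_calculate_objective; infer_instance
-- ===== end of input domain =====

-- B streams the matchups once, keeping per-pair counts and a running penalty (adding 2k-1 when a
-- pair seen k≥1 times recurs), instead of A's intermediate matchup list, count dict and final sum.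


-- ===== PORT A =====
-- hand port of itertools.combinations(group, 2): (group[i], group[j]) for i < j, in Python's
-- emission order; exact for r = 2
def pvComb2 : List Int → List (Int × Int)
  | [] => []
  | x :: rest => rest.map (fun y => (x, y)) ++ pvComb2 rest

def calculate_objective (schedule : List (List (List Int))) : Int :=
  let all_matchups := schedule.flatMap (fun week => week.flatMap (fun group => pvComb2 group))
  -- tuple(sorted(matchup)) on a 2-tuple is exactly this comparison swap
  let matchup_counts := all_matchups.foldl
    (fun d m => d.modify (if m.1 ≤ m.2 then m else (m.2, m.1)) (0 : Int) (· + 1))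
    PySem.Dict.empty
  (matchup_counts.values.map (fun count => (count - 1) ^ 2)).sum

-- ===== PORT B =====
def pvKey (a b : Int) : Int × Int := if a ≤ b then (a, b) else (b, a)

-- body of B's innermost 'for b in rest' loop
def pvStep (st : Int × PySem.Dict (Int × Int) Int) (a b : Int) :
    Int × PySem.Dict (Int × Int) Int :=
  let key := pvKey a b
  let k := st.2.getD key 0
  (if k ≠ 0 then st.1 + (2 * k - 1) else st.1, st.2.insert key (k + 1))

-- B's 'while rest: a = rest.pop(0); for b in rest: …' as structural recursion on the group
def pvGroupLoop (st : Int × PySem.Dict (Int × Int) Int) :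
    List Int → Int × PySem.Dict (Int × Int) Int
  | [] => st
  | a :: rest => pvGroupLoop (rest.foldl (fun s b => pvStep s a b) st) rest

def calculate_objective_alt (schedule : List (List (List Int))) : Int :=
  (schedule.foldl (fun st week => week.foldl (fun st group => pvGroupLoop st group) st)
    (0, PySem.Dict.empty)).1

-- ===== PRECONDITION & SPEC =====
def Spec_calculate_objective (schedule : List (List (List Int))) (out : Int) : Prop := out = calculate_objective_alt schedule
instance (schedule : List (List (List Int))) (out : Int) : Decidable (Spec_calculate_objective schedule out) := by unfold Spec_calculate_objective; infer_instance

-- ===== CLAIM (what is proved, stated in full; the proofs are below) =====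
def Claim_equal_calculate_objective : Prop := ∀ (schedule : List (List (List Int))), Dom_calculate_objective schedule → Spec_calculate_objective schedule (calculate_objective schedule)

-- ===== LEMMAS AND PROOFS =====

-- canonical key of a matchup pair, as A writes it
def pvSortKey (m : Int × Int) : Int × Int := if m.1 ≤ m.2 then m else (m.2, m.1)

-- A's penalty as a function of the canonicalized matchup list
def pvS (l : List (Int × Int)) : Int :=
  ((PySem.Set.ofList l).map (fun k => ((l.count k : Int) - 1) ^ 2)).sum

-- B's step, expressed on the canonical key
def pvStep' (st : Int × PySem.Dict (Int × Int) Int) (key : Int × Int) :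
    Int × PySem.Dict (Int × Int) Int :=
  let k := st.2.getD key 0
  (if k ≠ 0 then st.1 + (2 * k - 1) else st.1, st.2.insert key (k + 1))

lemma sum_map_sub (f g : (Int × Int) → Int) :
    ∀ (l : List (Int × Int)), l.Nodup → ∀ x ∈ l, (∀ k ∈ l, k ≠ x → f k = g k) →
      (l.map f).sum = (l.map g).sum + (f x - g x) := by
  intro l
  induction l with
  | nil => simp
  | cons y t ih =>
    intro hnd x hx hfg
    rcases List.mem_cons.mp hx with hyx | hxt
    · subst hyx
      have ht : ∀ k ∈ t, f k = g k := by
        intro k hk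
        exact hfg k (List.mem_cons_of_mem _ hk) (fun he => (List.nodup_cons.mp hnd).1 (he ▸ hk))
      have : (t.map f) = (t.map g) := List.map_congr_left ht
      simp [this]; ring
    · have hyne : f y = g y := hfg y (List.mem_cons_self) (fun he => (List.nodup_cons.mp hnd).1 (he ▸ hxt))
      have := ih (List.nodup_cons.mp hnd).2 x hxt
        (fun k hk hkx => hfg k (List.mem_cons_of_mem _ hk) hkx)
      simp [this, hyne]; ring

lemma pvS_append_singleton (l : List (Int × Int)) (x : Int × Int) :
    pvS (l ++ [x]) = pvS l + (if l.count x = 0 then 0 else 2 * (l.count x : Int) - 1) := by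
  unfold pvS
  rw [PySem.Set.ofList_append_singleton]
  by_cases hx : x ∈ l
  · rw [PySem.Set.add_of_mem (by simpa [PySem.Set.mem_ofList] using hx)]
    have hc : l.count x ≠ 0 := by simpa [List.count_eq_zero] using hx
    have := sum_map_sub
      (fun k => (((l ++ [x]).count k : Int) - 1) ^ 2)
      (fun k => ((l.count k : Int) - 1) ^ 2)
      (PySem.Set.ofList l) (PySem.Set.nodup_ofList l) x
      ((PySem.Set.mem_ofList l x).mpr hx)
      (by
        intro k _ hkx
        have : x ≠ k := Ne.symm hkx
        simp [List.count_append, this])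
    rw [this]
    have hcnt : ((l ++ [x]).count x : Int) = (l.count x : Int) + 1 := by
      simp [List.count_append]
    simp only [hcnt, if_neg hc]
    ring
  · rw [PySem.Set.add_of_not_mem (fun h => hx ((PySem.Set.mem_ofList l x).mp h))]
    have hc : l.count x = 0 := List.count_eq_zero.mpr hx
    rw [List.map_append, List.sum_append]
    have hmap : ((PySem.Set.ofList l).map (fun k => (((l ++ [x]).count k : Int) - 1) ^ 2))
        = ((PySem.Set.ofList l).map (fun k => ((l.count k : Int) - 1) ^ 2)) := by
      apply List.map_congr_left
      intro k hk
      have hkx : x ≠ k := fun he => hx (he ▸ ((PySem.Set.mem_ofList l k).mp hk))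
      simp [List.count_append, hkx]
    rw [hmap]
    simp [List.count_append, hc]

-- B's single pass computes (pvS l, the count dict) over the canonical matchup list
lemma pvB_invariant : ∀ (l : List (Int × Int)),
    l.foldl pvStep' (0, PySem.Dict.empty)
      = (pvS l, l.foldl (fun d x => d.insert x (d.getD x 0 + 1)) PySem.Dict.empty) := by
  intro l
  induction l using List.reverseRecOn with
  | nil => simp [pvS, PySem.Set.ofList_nil]
  | append_singleton t x ih =>
    rw [List.foldl_append, List.foldl_append, ih]
    simp only [List.foldl_cons, List.foldl_nil]
    unfold pvStep'
    have hget : (t.foldl (fun d x => d.insert x (d.getD x 0 + 1)) PySem.Dict.empty).getD x 0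
        = (t.count x : Int) := by
      rw [PySem.Dict.getD_foldl_insert_add_one]
      simp [PySem.Dict.getD_empty]
    rw [pvS_append_singleton]
    by_cases hc : t.count x = 0
    · simp [hget, hc]
    · simp [hget, hc]

-- B's nested loops fold pvStep' over the flattened canonical matchup stream
lemma pvGroupLoop_eq (st : Int × PySem.Dict (Int × Int) Int) (g : List Int) :
    pvGroupLoop st g = (pvComb2 g).foldl (fun s m => pvStep' s (pvSortKey m)) st := by
  induction g generalizing st with
  | nil => simp [pvGroupLoop, pvComb2]
  | cons a rest ih =>
    simp only [pvGroupLoop, pvComb2, List.foldl_append, List.foldl_map]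
    rw [ih]
    rfl

lemma pvAlt_eq (schedule : List (List (List Int))) :
    calculate_objective_alt schedule
      = ((schedule.flatMap (fun w => w.flatMap pvComb2)).foldl
          (fun s m => pvStep' s (pvSortKey m)) (0, PySem.Dict.empty)).1 := by
  unfold calculate_objective_alt
  congr 1
  rw [List.foldl_flatMap]
  apply PySem.List.foldl_congr_mem
  intro st w _
  rw [List.foldl_flatMap]
  exact PySem.List.foldl_congr_mem _ _ _ _ (fun st g _ => pvGroupLoop_eq st g)

-- A's count dict is counter of the canonicalized matchups, so its penalty sum is pvS
lemma pvA_eq (schedule : List (List (List Int))) :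
    calculate_objective schedule
      = pvS ((schedule.flatMap (fun w => w.flatMap pvComb2)).map pvSortKey) := by
  unfold calculate_objective
  set ms := schedule.flatMap (fun w => w.flatMap pvComb2) with hms
  have hfold : ms.foldl
      (fun d m => d.modify (if m.1 ≤ m.2 then m else (m.2, m.1)) (0 : Int) (· + 1))
      PySem.Dict.empty = PySem.Dict.counter (ms.map pvSortKey) := by
    rw [PySem.Dict.counter_eq_foldl, List.foldl_map]
    rfl
  simp only [hfold]
  have hvals : (PySem.Dict.counter (ms.map pvSortKey)).values
      = (PySem.Set.ofList (ms.map pvSortKey)).map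
          (fun k => ((ms.map pvSortKey).count k : Int)) := by
    rw [PySem.Dict.values_eq_map_keys _ (PySem.Dict.nodup_keys_counter _) 0,
      PySem.Dict.keys_counter]
    exact List.map_congr_left (fun k _ => PySem.Dict.getD_counter _ _)
  rw [hvals, pvS, List.map_map]
  rfl

-- ===== VERDICT (by name: the statement is the Claim_ definition above) =====
theorem calculate_objective_spec : Claim_equal_calculate_objective := by
  intro schedule _
  unfold Spec_calculate_objective
  rw [pvA_eq, pvAlt_eq, ← List.foldl_map, pvB_invariant]
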